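-- pv_equiv track=rewrite | github.com/maucon/ProjectEuler | src/main/python/p01/p_0145.py | solve
-- ===== SOURCE A (Python) =====
-- def solve(limit=1000000000):
--     s = 0
--     for i in [x for x in range(1, limit + 1) if x % 10 != 0]:
--         for c in str(i + int(str(i)[::-1])):
--             if int(c) & 1 == 0:
--                 break
--         else:
--             s += 1
--     return s
-- ===== SOURCE B (Python) =====
-- def _inc(ds):
--     # add 1 to a little-endian digit list
--     if not ds:
--         return [1]
--     if ds[0] == 9:
--         return [0] + _inc(ds[1:])
--     return [ds[0] + 1] + ds[1:]
--
--
-- def solve(limit=1000000000):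
--     count = 0
--     ds = [0]  # little-endian digits of the loop counter
--     for _ in range(1, limit + 1):
--         ds = _inc(ds)
--         if ds[0] != 0:
--             # digits of i + reverse(i) are the symmetric pair sums with carries;
--             # a final carry out can only be 1, which is an odd digit.
--             ok = True
--             carry = 0
--             for a, b in zip(ds, reversed(ds)):
--                 t = a + b + carry
--                 if t % 2 == 0:
--                     ok = False
--                     break
--                 carry = t // 10
--             if ok:
--                 count += 1
--     return count
-- ===== Notes on version B (the rewrite author's own statement) =====
-- stated objective: alternative
-- what changed: B drops all integer<->string conversions: it maintains the loop counter as a little-endian digit-list odometer (O(1) amortized increment) and decides reversibility by a single carry-propagating parity pass over the symmetric digit pairs (zip of the digit list with its reverse), never materializing reverse(i) or the sum i+reverse(i).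
import Mathlib
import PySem

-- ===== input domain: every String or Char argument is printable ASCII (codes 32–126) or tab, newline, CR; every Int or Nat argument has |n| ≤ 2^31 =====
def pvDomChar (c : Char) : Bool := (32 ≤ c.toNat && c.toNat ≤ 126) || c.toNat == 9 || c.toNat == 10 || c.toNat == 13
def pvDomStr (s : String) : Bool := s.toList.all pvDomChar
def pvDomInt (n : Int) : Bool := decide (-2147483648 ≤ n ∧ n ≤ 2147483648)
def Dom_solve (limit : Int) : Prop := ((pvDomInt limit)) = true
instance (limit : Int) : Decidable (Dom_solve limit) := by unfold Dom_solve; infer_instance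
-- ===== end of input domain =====

-- B replaces A's string machinery wholesale: it maintains the loop counter as a little-endian
-- digit-list odometer and decides reversibility by one carry-propagating parity pass over the
-- symmetric digit pairs, never materializing reverse(i) or the sum; objective: alternative.

-- ===== PORT A =====
-- the inner 'for c in str(...): if int(c) & 1 == 0: break / else:' — true iff no break;
-- 'none' = int(c) ValueError (unreachable: the characters come from str of a nonnegative int)
def solveInner : List Char → Bool
  | [] => true
  | c :: rest =>
    match PySem.Int.ofChars? [c] with
    | some v => if PySem.Int.band v 1 == 0 then false else solveInner rest
    | none => false

-- hand port of int(s) at this one call site: s = str(i)[::-1] for i ≥ 1 is always a nonempty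
-- string of ASCII digits, on which Python's int() is exactly this left fold (no sign, no
-- whitespace, no underscores can occur); general int() would be PySem.Int.ofStr?.
def pvRevVal (cs : List Char) : Int :=
  cs.foldl (fun a c => a * 10 + ((c.toNat : Int) - 48)) 0

-- the body of A's outer loop
def solveStep (s : Int) (i : Int) : Int :=
  let r := pvRevVal ((PySem.List.slice? (PySem.Int.toChars i) none none (-1)).getD [])
  if solveInner (PySem.Int.toChars (i + r)) then s + 1 else s

def solve (limit : Int) : Int :=
  (((PySem.List.pyRange 1 (limit + 1) 1).filter (fun x => PySem.Int.mod x 10 != 0)).foldl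
    solveStep 0)

-- ===== PORT B =====
-- digit values are nonnegative and < 10 throughout, so Nat's % and / agree with Python's here
def pvInc : List Nat → List Nat
  | [] => [1]
  | d :: rest => if d == 9 then 0 :: pvInc rest else (d + 1) :: rest

-- the 'for a, b in zip(ds, reversed(ds))' carry-parity loop; true iff no break
def pvPairGo : List (Nat × Nat) → Nat → Bool
  | [], _ => true
  | (a, b) :: rest, carry =>
    let t := a + b + carry
    if t % 2 == 0 then false else pvPairGo rest (t / 10)

-- the body of B's outer loop: state = (digit odometer, count)
def solveAltStep (st : List Nat × Int) (_i : Int) : List Nat × Int :=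
  let ds := pvInc st.1
  if ds.headD 0 != 0 then
    if pvPairGo (ds.zip ds.reverse) 0 then (ds, st.2 + 1) else (ds, st.2)
  else (ds, st.2)

def solve_alt (limit : Int) : Int :=
  ((PySem.List.pyRange 1 (limit + 1) 1).foldl solveAltStep ([0], 0)).2

-- ===== PRECONDITION & SPEC =====
def Spec_solve (limit : Int) (out : Int) : Prop := out = solve_alt limit
instance (limit : Int) (out : Int) : Decidable (Spec_solve limit out) := by unfold Spec_solve; infer_instance

-- ===== CLAIM (what is proved, stated in full; the proofs are below) =====
def Claim_equal_solve : Prop := ∀ (limit : Int), Dom_solve limit → Spec_solve limit (solve limit)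

-- ===== LEMMAS AND PROOFS =====

-- str(n) for positive n is the decimal digits, most significant first
theorem pv_toDigitsCore_eq (fuel : Nat) :
    ∀ (n : Nat) (ds : List Char), 0 < n → n < fuel →
      Nat.toDigitsCore 10 fuel n ds = ((Nat.digits 10 n).reverse.map Nat.digitChar) ++ ds := by
  induction fuel with
  | zero => intro n ds h1 h2; omega
  | succ fuel ih =>
    intro n ds h1 h2
    rw [Nat.toDigitsCore]
    by_cases hz : n / 10 = 0
    · simp only [hz]
      rw [Nat.digits_def' (by norm_num) h1, hz]
      simp
    · simp only [hz]
      rw [ih (n / 10) _ (by omega) (by omega)]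
      rw [Nat.digits_def' (by norm_num) h1]
      simp

theorem pv_toChars_pos (m : Int) (hm : 0 < m) :
    PySem.Int.toChars m = (Nat.digits 10 m.toNat).reverse.map Nat.digitChar := by
  have h1 : ¬ m < 0 := by omega
  simp only [PySem.Int.toChars, if_neg h1, Nat.toDigits]
  rw [pv_toDigitsCore_eq (m.toNat + 1) m.toNat [] (by omega) (by omega)]
  simp

-- int(c) for a decimal digit character
theorem pv_ofChars_digitChar (d : Nat) (hd : d < 10) :
    PySem.Int.ofChars? [Nat.digitChar d] = some (d : Int) := by
  interval_cases d <;> decide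

theorem pv_band_digit (d : Nat) (hd : d < 10) :
    (PySem.Int.band (d : Int) 1 == 0) = !(d % 2 == 1) := by
  interval_cases d <;> decide

theorem pv_solveInner_map (l : List Nat) (hl : ∀ d ∈ l, d < 10) :
    solveInner (l.map Nat.digitChar) = l.all (fun d => d % 2 == 1) := by
  induction l with
  | nil => rfl
  | cons d rest ih =>
    have hd : d < 10 := hl d (by simp)
    simp only [List.map_cons, solveInner, pv_ofChars_digitChar d hd, pv_band_digit d hd,
      List.all_cons]
    by_cases h : d % 2 == 1 <;>
      simp [h, ih (fun x hx => hl x (by simp [hx]))]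

-- the hand-ported int() fold on a digit string, as a value
theorem pv_digitChar_val (d : Nat) (hd : d < 10) :
    ((Nat.digitChar d).toNat : Int) - 48 = (d : Int) := by
  interval_cases d <;> decide

theorem pv_revVal_foldl (l : List Nat) (hl : ∀ d ∈ l, d < 10) :
    ∀ (a : Nat),
      (l.map Nat.digitChar).foldl (fun a c => a * 10 + ((c.toNat : Int) - 48)) (a : Int)
        = ((a * 10 ^ l.length + Nat.ofDigits 10 l.reverse : Nat) : Int) := by
  induction l with
  | nil => intro a; simp
  | cons d t ih =>
    intro a
    have hd : d < 10 := hl d (by simp)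
    simp only [List.map_cons, List.foldl_cons]
    rw [show ((a : Int) * 10 + (((Nat.digitChar d).toNat : Int) - 48)) = ((a * 10 + d : Nat) : Int) by
      rw [pv_digitChar_val d hd]; push_cast; ring]
    rw [ih (fun x hx => hl x (by simp [hx])) (a * 10 + d)]
    congr 1
    rw [List.reverse_cons, Nat.ofDigits_append]
    simp [Nat.ofDigits]
    ring

theorem pv_revVal_eq (l : List Nat) (hl : ∀ d ∈ l, d < 10) :
    pvRevVal (l.map Nat.digitChar) = ((Nat.ofDigits 10 l.reverse : Nat) : Int) := by
  have h := pv_revVal_foldl l hl 0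
  simpa [pvRevVal] using h

-- schoolbook carry propagation over a list of (pair) sums — proof-side model of B's loop
def carryRun : List Nat → Nat → List Nat
  | [], c => if c = 0 then [] else [c]
  | t :: rest, c => (t + c) % 10 :: carryRun rest ((t + c) / 10)

theorem pv_carryRun_ofDigits (p : List Nat) (c : Nat) :
    Nat.ofDigits 10 (carryRun p c) = c + Nat.ofDigits 10 p := by
  induction p generalizing c with
  | nil =>
    by_cases hc : c = 0 <;> simp [carryRun, hc, Nat.ofDigits]
  | cons t rest ih =>
    simp only [carryRun, Nat.ofDigits_cons, ih]
    omega

theorem pv_carryRun_lt (p : List Nat) (c : Nat) (hp : ∀ t ∈ p, t ≤ 18) (hc : c ≤ 1) :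
    ∀ x ∈ carryRun p c, x < 10 := by
  induction p generalizing c with
  | nil =>
    intro x hx
    by_cases hc0 : c = 0 <;> simp [carryRun, hc0] at hx <;> omega

  | cons t rest ih =>
    intro x hx
    simp only [carryRun, List.mem_cons] at hx
    have ht : t ≤ 18 := hp t (by simp)
    rcases hx with rfl | hx
    · omega
    · exact ih ((t + c) / 10) (fun y hy => hp y (by simp [hy])) (by omega) x hx

theorem pv_carryRun_ne_nil (t : Nat) (rest : List Nat) (c : Nat) :
    carryRun (t :: rest) c ≠ [] := by
  simp [carryRun]

theorem pv_carryRun_getLast? (p : List Nat) (c : Nat) (hp : ∀ t ∈ p, t ≤ 18) (hc : c ≤ 1)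
    (hne : p ≠ []) (hl : ∀ x, p.getLast? = some x → 1 ≤ x) :
    (carryRun p c).getLast? ≠ some 0 := by
  induction p generalizing c with
  | nil => exact absurd rfl hne
  | cons t rest ih =>
    have ht : t ≤ 18 := hp t (by simp)
    cases rest with
    | nil =>
      have ht1 : 1 ≤ t := hl t (by simp)
      by_cases hcar : (t + c) / 10 = 0
      · have h9 : t + c < 10 := by omega
        simp [carryRun, hcar, Nat.mod_eq_of_lt h9]
        omega
      · simp [carryRun, hcar]
    | cons r0 rrest =>
      have step : carryRun (t :: r0 :: rrest) c
          = (t + c) % 10 :: carryRun (r0 :: rrest) ((t + c) / 10) := rfl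
      rw [step]
      have hne2 : carryRun (r0 :: rrest) ((t + c) / 10) ≠ [] := pv_carryRun_ne_nil _ _ _
      obtain ⟨y, M, hym⟩ : ∃ y M, carryRun (r0 :: rrest) ((t + c) / 10) = y :: M := by
        cases hcr : carryRun (r0 :: rrest) ((t + c) / 10) with
        | nil => exact absurd hcr hne2
        | cons y M => exact ⟨y, M, rfl⟩
      rw [hym, List.getLast?_cons_cons, ← hym]
      exact ih ((t + c) / 10) (fun z hz => hp z (by simp [hz])) (by omega) (by simp)
        (fun x hx => hl x (by rw [List.getLast?_cons_cons]; exact hx))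

theorem pv_pairGo_carryRun (l : List (Nat × Nat)) (c : Nat)
    (hl : ∀ ab ∈ l, ab.1 ≤ 9 ∧ ab.2 ≤ 9) (hc : c ≤ 1) :
    pvPairGo l c = (carryRun (l.map (fun ab => ab.1 + ab.2)) c).all (fun d => d % 2 == 1) := by
  induction l generalizing c with
  | nil =>
    interval_cases c <;> simp [pvPairGo, carryRun]
  | cons ab rest ih =>
    obtain ⟨a, b⟩ := ab
    have hab : a ≤ 9 ∧ b ≤ 9 := hl (a, b) (by simp)
    simp only [pvPairGo, List.map_cons, carryRun, List.all_cons]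
    have hmod : (a + b + c) % 10 % 2 = (a + b + c) % 2 :=
      Nat.mod_mod_of_dvd _ (by norm_num)
    by_cases hpar : (a + b + c) % 2 = 0
    · simp [hmod, hpar]
    · have h1 : (a + b + c) % 2 = 1 := by omega
      simp only [hmod, h1]
      rw [ih ((a + b + c) / 10) (fun y hy => hl y (List.mem_cons_of_mem _ hy)) (by omega)]
      simp

-- the odometer: pvInc counts in base 10
theorem pv_inc_digits (n : Nat) (hn : 1 ≤ n) :
    pvInc (Nat.digits 10 n) = Nat.digits 10 (n + 1) := by
  induction n using Nat.strong_induction_on with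
  | _ n ih =>
    rw [Nat.digits_def' (by norm_num : (1:Nat) < 10) (by omega)]
    by_cases h9 : n % 10 = 9
    · have hb : ((n % 10 : Nat) == 9) = true := by simp [h9]
      simp only [pvInc, hb, if_pos]
      by_cases hz : n / 10 = 0
      · have hn9 : n = 9 := by omega
        subst hn9
        norm_num
        rfl
      · rw [ih (n / 10) (by omega) (by omega)]
        rw [Nat.digits_def' (by norm_num : (1:Nat) < 10) (by omega : 0 < n + 1)]
        have h1 : (n + 1) % 10 = 0 := by omega
        have h2 : (n + 1) / 10 = n / 10 + 1 := by omega
        rw [h1, h2]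
    · have hb : ((n % 10 : Nat) == 9) = false := by simp [h9]
      simp only [pvInc, hb, if_neg, Bool.false_eq_true, not_false_iff]
      rw [Nat.digits_def' (by norm_num : (1:Nat) < 10) (by omega : 0 < n + 1)]
      have h1 : (n + 1) % 10 = n % 10 + 1 := by omega
      have h2 : (n + 1) / 10 = n / 10 := by omega
      rw [h1, h2]

-- ofDigits is additive over pointwise sums of equal-length digit lists
theorem pv_ofDigits_zipWith (x : List Nat) :
    ∀ y : List Nat, x.length = y.length →
      Nat.ofDigits 10 (List.zipWith (· + ·) x y) = Nat.ofDigits 10 x + Nat.ofDigits 10 y := by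
  induction x with
  | nil => intro y h; cases y with
    | nil => simp
    | cons b ys => simp at h
  | cons a xs ih =>
    intro y h
    cases y with
    | nil => simp at h
    | cons b ys =>
      simp only [List.zipWith_cons_cons, Nat.ofDigits_cons, ih ys (by simpa using h)]
      ring

theorem pv_zipWith_le (x : List Nat) :
    ∀ y : List Nat, (∀ a ∈ x, a < 10) → (∀ b ∈ y, b < 10) →
      ∀ t ∈ List.zipWith (· + ·) x y, t ≤ 18 := by
  induction x with
  | nil => intro y _ _ t ht; simp at ht
  | cons a xs ih =>
    intro y hx hy t ht
    cases y with
    | nil => simp at ht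
    | cons b ys =>
      simp only [List.zipWith_cons_cons, List.mem_cons] at ht
      rcases ht with rfl | ht
      · have h1 := hx a (by simp)
        have h2 := hy b (by simp)
        omega
      · exact ih ys (fun z hz => hx z (by simp [hz])) (fun z hz => hy z (by simp [hz])) t ht

theorem pv_map_zip (x : List Nat) :
    ∀ y : List Nat, (x.zip y).map (fun ab => ab.1 + ab.2) = List.zipWith (· + ·) x y := by
  induction x with
  | nil => intro y; simp
  | cons a xs ih =>
    intro y
    cases y with
    | nil => simp
    | cons b ys => simp [ih ys]

-- the per-i core: B's pair test computes A's all-digits-odd test of i + reverse(i)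
theorem pv_core (i : Nat) (hi : 1 ≤ i) (h10 : i % 10 ≠ 0) :
    pvPairGo ((Nat.digits 10 i).zip (Nat.digits 10 i).reverse) 0
      = solveInner (PySem.Int.toChars ((i : Int) +
          pvRevVal ((PySem.List.slice? (PySem.Int.toChars (i : Int)) none none (-1)).getD []))) := by
  set D := Nat.digits 10 i with hD
  have hDlt : ∀ d ∈ D, d < 10 := fun d hd => Nat.digits_lt_base (by norm_num) hd
  have hDne : D ≠ [] := by
    rw [hD, Ne, Nat.digits_eq_nil_iff_eq_zero]; omega
  have hDcons : D = i % 10 :: Nat.digits 10 (i / 10) :=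
    Nat.digits_def' (by norm_num : (1:Nat) < 10) (by omega)
  -- A's string reversal and re-parse
  have htc : PySem.Int.toChars (i : Int) = D.reverse.map Nat.digitChar := by
    rw [pv_toChars_pos _ (by exact_mod_cast hi)]
    simp [hD]
  rw [PySem.List.slice?_none_none_neg_one]
  simp only [Option.getD_some]
  have hrevchars : (PySem.Int.toChars (i : Int)).reverse = D.map Nat.digitChar := by
    rw [htc, ← List.map_reverse, List.reverse_reverse]
  rw [hrevchars, pv_revVal_eq D hDlt]
  set rev := Nat.ofDigits 10 D.reverse with hrev
  have hsum : (i : Int) + ((rev : Nat) : Int) = ((i + rev : Nat) : Int) := by push_cast; ring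
  rw [hsum]
  -- A's inner loop is the all-digits-odd test on i + rev
  have hApos : 0 < i + rev := by omega
  rw [pv_toChars_pos _ (by exact_mod_cast hApos)]
  rw [show ((i + rev : Nat) : Int).toNat = i + rev from Int.toNat_natCast _]
  rw [pv_solveInner_map _ (by
    intro d hdm
    rw [List.mem_reverse] at hdm
    exact Nat.digits_lt_base (by norm_num) hdm), List.all_reverse]
  -- the digits of i + rev are the carry-propagated symmetric pair sums
  set p := List.zipWith (· + ·) D D.reverse with hp
  have hofp : Nat.ofDigits 10 p = i + rev := by
    rw [hp, pv_ofDigits_zipWith D D.reverse (by simp), hD, Nat.ofDigits_digits]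
  have hple : ∀ t ∈ p, t ≤ 18 := by
    rw [hp]
    exact pv_zipWith_le D D.reverse hDlt (fun b hb => hDlt b (List.mem_reverse.mp hb))
  have hn1 : 1 ≤ D.length := by
    have := List.length_pos_of_ne_nil hDne
    omega
  have hplen : p.length = D.length := by rw [hp]; simp
  have hpne : p ≠ [] := by
    intro h0
    rw [h0] at hplen
    simp at hplen
    omega
  have hlast : ∀ x, p.getLast? = some x → 1 ≤ x := by
    intro x hx
    rw [List.getLast?_eq_some_getLast hpne] at hx
    obtain rfl : p.getLast hpne = x := Option.some.inj hx
    rw [List.getLast_eq_getElem]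
    simp only [hp, List.getElem_zipWith, List.length_zipWith, List.length_reverse, min_self,
      List.getElem_reverse, Nat.sub_self]
    simp only [hDcons, List.getElem_cons_zero]
    omega
  have hdig : Nat.digits 10 (i + rev) = carryRun p 0 := by
    have h1 : Nat.ofDigits 10 (carryRun p 0) = i + rev := by
      rw [pv_carryRun_ofDigits, hofp]
      omega
    rw [← h1]
    refine Nat.digits_ofDigits 10 (by norm_num) _ (pv_carryRun_lt p 0 hple (by omega)) ?_
    intro h hz
    exact pv_carryRun_getLast? p 0 hple (by omega) hpne hlast
      (by rw [List.getLast?_eq_some_getLast h, hz])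
  rw [hdig]
  -- B's loop is the carry-propagated parity test over the same pair sums
  rw [pv_pairGo_carryRun _ 0 (by
    intro ab hab
    obtain ⟨h1, h2⟩ := List.of_mem_zip hab
    exact ⟨by have := hDlt _ h1; omega, by have := hDlt _ (List.mem_reverse.mp h2); omega⟩) (by omega)]
  rw [pv_map_zip D D.reverse, ← hp]

-- the two folds agree step by step; B's odometer state is the digit list of the step count
theorem pv_main (m : Nat) :
    ((PySem.List.pyRange 1 ((m : Int) + 1) 1).foldl solveAltStep ([0], 0)).1
        = (if m = 0 then [0] else Nat.digits 10 m)
    ∧ ((PySem.List.pyRange 1 ((m : Int) + 1) 1).foldl solveAltStep ([0], 0)).2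
        = (PySem.List.pyRange 1 ((m : Int) + 1) 1).foldl
            (fun s x => if PySem.Int.mod x 10 != 0 then solveStep s x else s) 0 := by
  induction m with
  | zero =>
    rw [PySem.List.pyRange_one_eq_nil (by norm_num)]
    exact ⟨rfl, rfl⟩
  | succ k ih =>
    obtain ⟨ih1, ih2⟩ := ih
    have hcast : ((k + 1 : Nat) : Int) = (k : Int) + 1 := by push_cast; ring
    rw [hcast]
    have hsplit : PySem.List.pyRange 1 ((k : Int) + 1 + 1) 1
        = PySem.List.pyRange 1 ((k : Int) + 1) 1 ++ [(k : Int) + 1] :=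
      PySem.List.pyRange_one_succ_right (by omega)
    rw [hsplit, List.foldl_append, List.foldl_append]
    have hds : pvInc (((PySem.List.pyRange 1 ((k : Int) + 1) 1).foldl solveAltStep ([0], 0)).1)
        = Nat.digits 10 (k + 1) := by
      rw [ih1]
      by_cases hk : k = 0
      · subst hk
        norm_num
        rfl
      · rw [if_neg hk]
        exact pv_inc_digits k (by omega)
    have hhead : (Nat.digits 10 (k + 1)).headD 0 = (k + 1) % 10 := by
      rw [Nat.digits_def' (by norm_num : (1:Nat) < 10) (by omega)]
      rfl
    have hmodx : PySem.Int.mod ((k : Int) + 1) 10 = (((k + 1) % 10 : Nat) : Int) := by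
      rw [show ((k : Int) + 1) = ((k + 1 : Nat) : Int) from by push_cast; ring]
      exact_mod_cast PySem.Int.mod_natCast (k + 1) 10
    constructor
    · simp only [List.foldl_cons, List.foldl_nil, solveAltStep, hds]
      rw [if_neg (Nat.succ_ne_zero k)]
      split_ifs <;> rfl
    · simp only [List.foldl_cons, List.foldl_nil, solveAltStep, hds, hhead, hmodx, ih2]
      set C := List.foldl (fun s x => if (PySem.Int.mod x 10 != 0) = true then solveStep s x else s)
        0 (PySem.List.pyRange 1 ((k : Int) + 1) 1) with hC
      by_cases h0 : (k + 1) % 10 = 0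
      · have e0 : (((k + 1) % 10 : Nat) : Int) = 0 := by exact_mod_cast h0
        have n1 : ¬((((k + 1) % 10 : Nat) != (0 : Nat)) = true) := by simp [h0]
        have n2 : ¬(((((k + 1) % 10 : Nat) : Int) != (0 : Int)) = true) := by simp [e0]
        rw [if_neg n1, if_neg n2]
      · have hne2 : (((k + 1) % 10 : Nat) : Int) ≠ 0 := by exact_mod_cast h0
        have e1 : ((((k + 1) % 10 : Nat) != (0 : Nat)) = true) := by
          rw [bne_iff_ne]; exact h0
        have e2 : (((((k + 1) % 10 : Nat) : Int) != (0 : Int)) = true) := by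
          rw [bne_iff_ne]; exact hne2
        rw [if_pos e1, if_pos e2]
        rw [show ((k : Int) + 1) = ((k + 1 : Nat) : Int) from by push_cast; ring]
        simp only [solveStep]
        rw [← pv_core (k + 1) (by omega) h0]
        split_ifs <;> rfl

-- ===== VERDICT (by name: the statement is the Claim_ definition above) =====
theorem solve_spec : Claim_equal_solve := by
  intro limit _
  unfold Spec_solve solve solve_alt
  rw [List.foldl_filter]
  by_cases hle : limit ≤ 0
  · rw [PySem.List.pyRange_one_eq_nil (by omega)]
    rfl
  · rw [show limit = ((limit.toNat : Nat) : Int) from by omega]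
    exact ((pv_main limit.toNat).2).symm
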